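-- pv_equiv track=rewrite | github.com/OOXXXX/PythonFile | CW-python/contact.py | find_infection_windows
-- ===== SOURCE A (Python) =====
-- def find_infection_windows(vks):
--     windows = {}
--     last_vk = vks[-1]
--
--     for participant, status in last_vk.items():
--         if status == "V":
--             start = 0
--             end = len(vks) - 1
--
--             # Find the last confirmed human status
--             for t in range(len(vks) - 1, -1, -1):
--                 if vks[t][participant] == "H":
--                     start = t
--                     break
--
--             # Find the first confirmed vampire status
--             for t in range(start + 1, len(vks)):
--                 if vks[t][participant] == "V":
--                     end = t
--                     break
--
--             windows[participant] = (start, end)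
--
--     return windows
-- ===== SOURCE B (Python) =====
-- def find_infection_windows(vks):
--     windows = {}
--     n = len(vks)
--     for participant, status in vks[-1].items():
--         if status != "V":
--             continue
--         last_h = -1
--         candidate = None
--         for t, snap in enumerate(vks):
--             s = snap[participant]
--             if s == "H":
--                 last_h = t
--                 candidate = None
--             elif s == "V" and candidate is None and t > max(last_h, 0):
--                 candidate = t
--         start = last_h if last_h >= 0 else 0
--         end = candidate if candidate is not None else n - 1
--         windows[participant] = (start, end)
--     return windows
-- ===== Notes on version B (the rewrite author's own statement) =====
-- stated objective: alternative
-- what changed: A runs two directional scans per vampire participant (a backward scan for the last 'H', then a forward scan for the first 'V' after it); B makes a single left-to-right pass per participant maintaining running state (index of the last 'H' and the first 'V' candidate after it) and derives the window from the final state.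
-- outside the precondition, e.g. on find_infection_windows([{}, {'a': 'H'}, {'a': 'V'}]): A returns {'a': (1, 2)}, B raises KeyError
import Mathlib
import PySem

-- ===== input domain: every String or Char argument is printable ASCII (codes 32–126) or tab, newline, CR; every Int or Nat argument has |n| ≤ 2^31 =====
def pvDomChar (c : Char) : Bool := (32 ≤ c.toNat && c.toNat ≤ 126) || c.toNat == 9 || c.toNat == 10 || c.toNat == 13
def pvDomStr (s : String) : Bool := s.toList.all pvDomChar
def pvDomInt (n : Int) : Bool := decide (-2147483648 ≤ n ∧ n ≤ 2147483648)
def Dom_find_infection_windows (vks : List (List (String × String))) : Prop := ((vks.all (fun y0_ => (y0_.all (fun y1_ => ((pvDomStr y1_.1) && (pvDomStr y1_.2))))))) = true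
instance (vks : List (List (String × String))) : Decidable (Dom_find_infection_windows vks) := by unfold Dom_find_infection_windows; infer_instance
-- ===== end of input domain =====

-- B replaces A's two directional scans per participant (backward for the last 'H', forward for the
-- first 'V' after it) by a single left-to-right pass keeping running state (last 'H' index, first
-- 'V' candidate after it); same cost class, different decomposition (objective: alternative).

-- ===== PORT A =====
-- vks[t][participant] : dict lookup inside an indexed snapshot (none = IndexError/KeyError)
def pvA_look (vks : List (List (String × String))) (t : Int) (p : String) : Option String :=
  match PySem.List.pyGet? vks t with
  | none => none
  | some d => (PySem.Dict.mk d).get? p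

-- 'for t in range(...): if vks[t][p] == "H": start = t; break' with start initially s
def pvA_back (vks : List (List (String × String))) (p : String) : List Int → Int → Int
  | [], s => s
  | t :: ts, s => if pvA_look vks t p = some "H" then t else pvA_back vks p ts s

-- 'for t in range(...): if vks[t][p] == "V": end = t; break' with end initially e
def pvA_fwd (vks : List (List (String × String))) (p : String) : List Int → Int → Int
  | [], e => e
  | t :: ts, e => if pvA_look vks t p = some "V" then t else pvA_fwd vks p ts e

def find_infection_windows (vks : List (List (String × String))) : List (String × Int × Int) :=
  match PySem.List.pyGet? vks (-1) with
  | none => []  -- vks[-1] raises IndexError on empty vks; excluded by Pre_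
  | some last_vk =>
    let n : Int := vks.length
    ((PySem.Dict.mk last_vk).items.foldl
      (fun (w : PySem.Dict String (Int × Int)) ps =>
        if ps.2 = "V" then
          let start := pvA_back vks ps.1 (PySem.List.pyRange (n - 1) (-1) (-1)) 0
          let e := pvA_fwd vks ps.1 (PySem.List.pyRange (start + 1) n 1) (n - 1)
          w.insert ps.1 (start, e)
        else w)
      PySem.Dict.empty).items

-- ===== PORT B =====
-- one step of B's single forward pass: state = (last_h, candidate), input = (t, snapshot)
def pvB_step (p : String) (st : Int × Option Int) (ts : Int × List (String × String)) : Int × Option Int :=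
  match (PySem.Dict.mk ts.2).get? p with
  | none => st  -- snap[participant] raises KeyError; excluded by Pre_
  | some s =>
    if s = "H" then (ts.1, none)
    else if s = "V" ∧ st.2 = none ∧ max st.1 0 < ts.1 then (st.1, some ts.1)
    else st

def find_infection_windows_alt (vks : List (List (String × String))) : List (String × Int × Int) :=
  match PySem.List.pyGet? vks (-1) with
  | none => []  -- vks[-1] raises IndexError on empty vks; excluded by Pre_
  | some last_vk =>
    let n : Int := vks.length
    ((PySem.Dict.mk last_vk).items.foldl
      (fun (w : PySem.Dict String (Int × Int)) ps =>
        if ps.2 = "V" then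
          let r := (PySem.List.enumerate vks 0).foldl (pvB_step ps.1) (-1, none)
          let start := if 0 ≤ r.1 then r.1 else 0
          let e := match r.2 with | some c => c | none => n - 1
          w.insert ps.1 (start, e)
        else w)
      PySem.Dict.empty).items

-- ===== PRECONDITION & SPEC =====
-- Pre_ excludes (a) empty vks, where A raises IndexError; (b) snapshots whose association list
-- carries a duplicate key, where the List-encoding of a Python dict is ambiguous (first vs last
-- match); and (c) inputs where a participant that is "V" in the last snapshot is missing from some
-- earlier snapshot: there A may either raise KeyError or, if a break fires first, return a value
-- that depends on its scan order, while B's single full pass raises KeyError.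
def Pre_find_infection_windows (vks : List (List (String × String))) : Prop :=
  vks ≠ [] ∧ (∀ d ∈ vks, (d.map Prod.fst).Nodup) ∧
  (∀ ps ∈ vks.getLast?.getD [], ps.2 = "V" → ∀ d ∈ vks, ps.1 ∈ d.map Prod.fst)
instance (vks : List (List (String × String))) : Decidable (Pre_find_infection_windows vks) := by
  unfold Pre_find_infection_windows; infer_instance

def pvWitness_find_infection_windows : (List (List (String × String))) :=
  [[("a", "H"), ("b", "H")], [("a", "V"), ("b", "H")]]

def Spec_find_infection_windows (vks : List (List (String × String))) (out : List (String × Int × Int)) : Prop := out = find_infection_windows_alt vks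
instance (vks : List (List (String × String))) (out : List (String × Int × Int)) : Decidable (Spec_find_infection_windows vks out) := by unfold Spec_find_infection_windows; infer_instance

-- ===== CLAIM (what is proved, stated in full; the proofs are below) =====
def Claim_equal_find_infection_windows : Prop := ∀ (vks : List (List (String × String))), Dom_find_infection_windows vks → Pre_find_infection_windows vks → Spec_find_infection_windows vks (find_infection_windows vks)

-- ===== LEMMAS AND PROOFS =====

-- B's scan state after the whole pass, for participant p
def pvBst (p : String) (vks : List (List (String × String))) : Int × Option Int :=
  (PySem.List.enumerate vks 0).foldl (pvB_step p) (-1, none)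

lemma pv_find?_congr {α : Type} (l : List α) (p q : α → Bool) (h : ∀ x ∈ l, p x = q x) :
    l.find? p = l.find? q := by
  induction l with
  | nil => rfl
  | cons x xs ih =>
    simp only [List.find?_cons, h x (by simp)]
    cases q x <;> simp [ih (fun y hy => h y (by simp [hy]))]

lemma pvA_back_eq_find? (vks : List (List (String × String))) (p : String) (l : List Int) (s : Int) :
    pvA_back vks p l s = ((l.find? (fun t => pvA_look vks t p == some "H")).getD s) := by
  induction l with
  | nil => rfl
  | cons t ts ih =>
    cases hb : (pvA_look vks t p == some "H") with
    | true =>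
      simp only [pvA_back, List.find?_cons, hb, if_pos (show pvA_look vks t p = some "H" by simpa using hb)]
      rfl
    | false =>
      simp only [pvA_back, List.find?_cons, hb, if_neg (show ¬ pvA_look vks t p = some "H" by simpa using hb)]
      exact ih

lemma pvA_fwd_eq_find? (vks : List (List (String × String))) (p : String) (l : List Int) (e : Int) :
    pvA_fwd vks p l e = ((l.find? (fun t => pvA_look vks t p == some "V")).getD e) := by
  induction l with
  | nil => rfl
  | cons t ts ih =>
    cases hb : (pvA_look vks t p == some "V") with
    | true =>
      simp only [pvA_fwd, List.find?_cons, hb, if_pos (show pvA_look vks t p = some "V" by simpa using hb)]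
      rfl
    | false =>
      simp only [pvA_fwd, List.find?_cons, hb, if_neg (show ¬ pvA_look vks t p = some "V" by simpa using hb)]
      exact ih

lemma pv_get?_of_mem_keys (d : List (String × String)) (p : String)
    (h : p ∈ d.map Prod.fst) : ∃ x, (PySem.Dict.mk d).get? p = some x := by
  cases hg : (PySem.Dict.mk d).get? p with
  | some x => exact ⟨x, rfl⟩
  | none =>
    rw [PySem.Dict.get?_eq_none_iff_not_mem_keys] at hg
    exact absurd (by simpa [PySem.Dict.keys_mk] using h) hg

lemma pv_look_append_lt (vks : List (List (String × String))) (d : List (String × String))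
    (t : Int) (h0 : 0 ≤ t) (h1 : t < (vks.length : Int)) (p : String) :
    pvA_look (vks ++ [d]) t p = pvA_look vks t p := by
  unfold pvA_look
  rw [PySem.List.pyGet?_of_nonneg _ h0, PySem.List.pyGet?_of_nonneg _ h0,
    List.getElem?_append_left (by omega)]

lemma pv_look_append_last (vks : List (List (String × String))) (d : List (String × String)) (p : String) :
    pvA_look (vks ++ [d]) (vks.length : Int) p = (PySem.Dict.mk d).get? p := by
  unfold pvA_look
  rw [show vks ++ [d] = vks ++ d :: [] from rfl, PySem.List.pyGet?_append_length]

lemma pv_main (p : String) (vks : List (List (String × String)))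
    (hp : ∀ d ∈ vks, p ∈ d.map Prod.fst) :
    (pvBst p vks).1 < (vks.length : Int) ∧
    pvA_back vks p (PySem.List.pyRange ((vks.length : Int) - 1) (-1) (-1)) 0 = max (pvBst p vks).1 0 ∧
    (∀ c, (pvBst p vks).2 = some c → max (pvBst p vks).1 0 < c ∧ c < (vks.length : Int)) ∧
    ((PySem.List.pyRange (max (pvBst p vks).1 0 + 1) (vks.length : Int) 1).find?
      (fun t => pvA_look vks t p == some "V")) = (pvBst p vks).2 := by
  induction vks using List.reverseRecOn with
  | nil =>
    refine ⟨by norm_num [pvBst, PySem.List.enumerate_nil], ?_, by simp [pvBst, PySem.List.enumerate_nil], ?_⟩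
    · rw [show ((([] : List (List (String × String))).length : Int) - 1) = -1 by simp,
        PySem.List.pyRange_neg_one_eq_nil le_rfl]
      simp [pvBst, PySem.List.enumerate_nil, pvA_back]
    · rw [show (((([] : List (List (String × String))).length : Int))) = 0 by simp,
        PySem.List.pyRange_one_eq_nil (by simp [pvBst, PySem.List.enumerate_nil] : (0:Int) ≤ max (pvBst p []).1 0 + 1)]
      simp [pvBst, PySem.List.enumerate_nil]
  | append_singleton xs d ih =>
    obtain ⟨h1, h2, h3, h4⟩ := ih (fun e he => hp e (by simp [he]))
    obtain ⟨x, hx⟩ := pv_get?_of_mem_keys d p (hp d (by simp))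
    set n : Int := (xs.length : Int) with hn
    have hn0 : 0 ≤ n := by positivity
    have hlen : (((xs ++ [d]).length : Int)) = n + 1 := by simp [hn]
    have hst' : pvBst p (xs ++ [d]) = pvB_step p (pvBst p xs) (n, d) := by
      rw [pvBst, PySem.List.enumerate_append, List.foldl_append]
      simp [pvBst, PySem.List.enumerate_cons, PySem.List.enumerate_nil, hn]
    have hlookN : pvA_look (xs ++ [d]) n p = some x := by
      rw [hn, pv_look_append_last]; exact hx
    set st := pvBst p xs with hstdef
    -- the old ranges read the same statuses in the extended list
    have hcongrH :
        (PySem.List.pyRange (n - 1) (-1) (-1)).find? (fun t => pvA_look (xs ++ [d]) t p == some "H")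
          = (PySem.List.pyRange (n - 1) (-1) (-1)).find? (fun t => pvA_look xs t p == some "H") := by
      refine pv_find?_congr _ _ _ (fun t ht => ?_)
      rw [PySem.List.mem_pyRange_neg_one] at ht
      rw [pv_look_append_lt xs d t (by omega) (by omega)]
    have hcongrV : ∀ (a b : Int), 0 ≤ a → b ≤ n →
        (PySem.List.pyRange a b 1).find? (fun t => pvA_look (xs ++ [d]) t p == some "V")
          = (PySem.List.pyRange a b 1).find? (fun t => pvA_look xs t p == some "V") := by
      intro a b ha hb
      refine pv_find?_congr _ _ _ (fun t ht => ?_)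
      rw [PySem.List.mem_pyRange_one] at ht
      rw [pv_look_append_lt xs d t (by omega) (by omega)]
    -- the backward scan over the extended list, head peeled
    have hback : ∀ (s0 : Int), pvA_back (xs ++ [d]) p
        (PySem.List.pyRange ((n + 1) - 1) (-1) (-1)) s0
        = if x = "H" then n else pvA_back xs p (PySem.List.pyRange (n - 1) (-1) (-1)) s0 := by
      intro s0
      rw [show (n + 1) - 1 = n by ring, PySem.List.pyRange_neg_one_cons (by omega)]
      by_cases hH : x = "H"
      · simp only [pvA_back, hlookN, hH, if_pos]
      · rw [pvA_back, if_neg (by rw [hlookN]; simpa using hH), if_neg hH,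
          pvA_back_eq_find?, hcongrH, ← pvA_back_eq_find?]
    have hstep : pvB_step p st (n, d)
        = if x = "H" then (n, none)
          else if x = "V" ∧ st.2 = none ∧ max st.1 0 < n then (st.1, some n) else st := by
      simp [pvB_step, hx]
    rw [hlen, hst', hstep]
    by_cases hH : x = "H"
    · -- a fresh 'H' at index n resets the state to (n, none)
      rw [if_pos hH]
      refine ⟨by simp only []; omega, ?_, by simp, ?_⟩
      · rw [hback 0, if_pos hH]
        simp only []
        omega
      · simp only
        rw [show max (n : Int) 0 = n by omega, PySem.List.pyRange_one_eq_nil (by omega)]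
        rfl
    · rw [if_neg hH]
      by_cases hg : x = "V" ∧ st.2 = none ∧ max st.1 0 < n
      · -- first 'V' after the running start: candidate becomes n
        rw [if_pos hg]
        obtain ⟨hV, hc, hlt⟩ := hg
        refine ⟨by omega, ?_, ?_, ?_⟩
        · rw [hback 0, if_neg hH]; exact h2
        · intro c hc'
          simp only at hc'
          obtain rfl : c = n := by simpa using hc'.symm
          exact ⟨hlt, by omega⟩
        · simp only
          rw [PySem.List.pyRange_one_succ_right (by omega), List.find?_append,
            hcongrV _ _ (by omega) le_rfl, h4, hc]
          simp [hlookN, hV]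
      · -- state unchanged
        rw [if_neg hg]
        refine ⟨by omega, ?_, ?_, ?_⟩
        · rw [hback 0, if_neg hH]; exact h2
        · intro c hc'; obtain ⟨hc1, hc2⟩ := h3 c hc'; exact ⟨hc1, by omega⟩
        · cases hc : st.2 with
          | some c =>
            obtain ⟨hc1, hc2⟩ := h3 c hc
            rw [PySem.List.pyRange_one_succ_right (by omega), List.find?_append,
              hcongrV _ _ (by omega) le_rfl, h4, hc]
            rfl
          | none =>
            by_cases hsn : max st.1 0 < n
            · have hV : x ≠ "V" := by
                intro hxv; exact hg ⟨hxv, hc, hsn⟩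
              rw [PySem.List.pyRange_one_succ_right (by omega), List.find?_append,
                hcongrV _ _ (by omega) le_rfl, h4, hc]
              simp [hlookN, hV]
            · have hn00 : n = 0 := by omega
              have hs0 : max st.1 0 = 0 := by omega
              rw [hs0, hn00, PySem.List.pyRange_one_eq_nil (by omega)]
              rfl

-- ===== VERDICT (by name: the statement is the Claim_ definition above) =====
theorem find_infection_windows_spec : Claim_equal_find_infection_windows := by
  intro vks _ hpre
  obtain ⟨hne, hnd, hkeys⟩ := hpre
  unfold Spec_find_infection_windows find_infection_windows find_infection_windows_alt
  rw [PySem.List.pyGet?_neg_one]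
  cases hlast : vks.getLast? with
  | none => rfl
  | some last =>
    simp only
    congr 1
    refine PySem.List.foldl_congr_mem' _ _ _ _ (fun ps hps w => ?_)
    by_cases hv : ps.2 = "V"
    · rw [if_pos hv, if_pos hv]
      have hp : ∀ d ∈ vks, ps.1 ∈ d.map Prod.fst :=
        hkeys ps (by rw [hlast]; exact hps) hv
      obtain ⟨m1, m2, m3, m4⟩ := pv_main ps.1 vks hp
      have hr : (PySem.List.enumerate vks 0).foldl (pvB_step ps.1) (-1, none) = pvBst ps.1 vks := rfl
      rw [hr, m2, pvA_fwd_eq_find?, m4]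
      have hs : (if 0 ≤ (pvBst ps.1 vks).1 then (pvBst ps.1 vks).1 else 0) = max (pvBst ps.1 vks).1 0 := by
        split <;> omega
      rw [hs]
      cases (pvBst ps.1 vks).2 <;> rfl
    · rw [if_neg hv, if_neg hv]
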